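-- pv_equiv track=rewrite | github.com/oldnordic/kwecli | bridge/quality_metrics_core.py | _fast_syntax_check
-- ===== SOURCE A (Python) =====
-- def _fast_syntax_check(content: str) -> bool:
--     """Fast syntax validation without compilation (phi 500mb approach)."""
--     try:
--         # Quick syntax checks without full compilation
--         lines = content.splitlines()
--         indent_stack = []
--
--         for line in lines:
--             stripped = line.strip()
--             if not stripped or stripped.startswith('#'):
--                 continue
--
--             # Check for basic syntax errors
--             if stripped.endswith(':'):
--                 # New indent level expected
--                 current_indent = len(line) - len(line.lstrip())
--                 indent_stack.append(current_indent)
--             elif line.startswith(' ' * 4) or line.startswith('\t'):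
--                 # Indented line - check if we expect indentation
--                 if not indent_stack:
--                     return False  # Unexpected indentation
--
--         return True  # Basic syntax looks valid
--     except Exception:
--         return False
-- ===== SOURCE B (Python) =====
-- def _fast_syntax_check(content: str) -> bool:
--     """Staged passes: filter significant lines, find the first decisive one."""
--     try:
--         significant = [l for l in content.splitlines()
--                        if l.strip() and not l.strip().startswith('#')]
--         decider = next((l for l in significant
--                         if l.strip().endswith(':')
--                         or l.startswith('    ') or l.startswith('\t')), None)
--         return decider is None or decider.strip().endswith(':')
--     except Exception:
--         return False
-- ===== Notes on version B (the rewrite author's own statement) =====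
-- stated objective: simpler
-- what changed: Replaced the stateful loop maintaining an indent_stack by two staged declarative passes: filter out blank and comment lines, find the first decisive line (colon-suffixed or indented), and return whether it is absent or colon-suffixed; correct because once the stack is non-empty A can never return False, so only the first decisive significant line matters.
import Mathlib
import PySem

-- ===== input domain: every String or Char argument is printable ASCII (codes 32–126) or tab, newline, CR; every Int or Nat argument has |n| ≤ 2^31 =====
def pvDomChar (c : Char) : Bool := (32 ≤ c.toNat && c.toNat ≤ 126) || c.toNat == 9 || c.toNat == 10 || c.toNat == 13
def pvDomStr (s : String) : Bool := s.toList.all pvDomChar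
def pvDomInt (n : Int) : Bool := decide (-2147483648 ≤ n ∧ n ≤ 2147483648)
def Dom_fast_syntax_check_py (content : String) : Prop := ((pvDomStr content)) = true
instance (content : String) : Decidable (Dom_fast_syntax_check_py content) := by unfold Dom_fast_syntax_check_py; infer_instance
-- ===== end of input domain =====

-- B replaces A's stateful indent_stack loop by two staged passes (filter significant lines, find the first decisive one); same return value.

-- ===== PORT A =====
-- loop over lines carrying the indent_stack, early return False possible
def pvGoA : List String → List Int → Bool
  | [], _ => true
  | line :: rest, stack =>
    let stripped := PySem.Str.strip line
    if (stripped == "") || PySem.Str.startswith stripped "#" then pvGoA rest stack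
    else if PySem.Str.endswith stripped ":" then
      pvGoA rest (stack ++ [PySem.Str.len line - PySem.Str.len (PySem.Str.lstrip line)])
    else if PySem.Str.startswith line "    " || PySem.Str.startswith line "\t" then
      if stack.isEmpty then false else pvGoA rest stack
    else pvGoA rest stack

def fast_syntax_check_py (content : String) : Bool :=
  pvGoA (PySem.Str.splitlines content) []

-- ===== PORT B =====
-- a line is significant if its strip is non-empty and not a comment
def pvSig (l : String) : Bool :=
  !(PySem.Str.strip l == "") && !(PySem.Str.startswith (PySem.Str.strip l) "#")

-- a significant line is decisive if it ends with ':' or is indented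
def pvDecisive (l : String) : Bool :=
  PySem.Str.endswith (PySem.Str.strip l) ":" ||
  PySem.Str.startswith l "    " || PySem.Str.startswith l "\t"

def fast_syntax_check_py_alt (content : String) : Bool :=
  match ((PySem.Str.splitlines content).filter pvSig).find? pvDecisive with
  | none => true
  | some l => PySem.Str.endswith (PySem.Str.strip l) ":"

-- ===== PRECONDITION & SPEC =====
def Spec_fast_syntax_check_py (content : String) (out : Bool) : Prop := out = fast_syntax_check_py_alt content
instance (content : String) (out : Bool) : Decidable (Spec_fast_syntax_check_py content out) := by unfold Spec_fast_syntax_check_py; infer_instance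

-- ===== CLAIM (what is proved, stated in full; the proofs are below) =====
def Claim_equal_fast_syntax_check_py : Prop := ∀ (content : String), Dom_fast_syntax_check_py content → Spec_fast_syntax_check_py content (fast_syntax_check_py content)

-- ===== LEMMAS AND PROOFS =====
-- Once the stack is non-empty, A's loop can never return False.
theorem pvGoA_nonempty (ls : List String) : ∀ (st : List Int), st ≠ [] → pvGoA ls st = true := by
  induction ls with
  | nil => intro st _; rfl
  | cons line rest ih =>
    intro st hst
    simp only [pvGoA]
    split_ifs with h1 h2 h3 h4
    · exact ih st hst
    · exact ih _ (by simp)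
    · exact absurd (List.isEmpty_iff.mp h4) hst
    · exact ih st hst
    · exact ih st hst

-- With an empty stack, A's loop computes B's filter-then-find? expression.
theorem pvGoA_empty_eq (ls : List String) :
    pvGoA ls [] = (match (ls.filter pvSig).find? pvDecisive with
                   | none => true
                   | some l => PySem.Str.endswith (PySem.Str.strip l) ":") := by
  induction ls with
  | nil => rfl
  | cons line rest ih =>
    simp only [pvGoA, List.filter_cons]
    by_cases hsig : pvSig line = true
    · have hsig' : ((PySem.Str.strip line == "") || PySem.Str.startswith (PySem.Str.strip line) "#") = false := by
        simp only [pvSig, Bool.and_eq_true, Bool.not_eq_true'] at hsig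
        rw [hsig.1, hsig.2]; rfl
      rw [if_neg (by rw [hsig']; exact Bool.false_ne_true), if_pos hsig, List.find?_cons]
      by_cases hcol : PySem.Str.endswith (PySem.Str.strip line) ":" = true
      · have hdec : pvDecisive line = true := by simp only [pvDecisive, hcol, Bool.true_or]
        rw [if_pos hcol]
        simp only [hdec]
        rw [pvGoA_nonempty rest _ (by simp), hcol]
      · rw [Bool.not_eq_true] at hcol
        rw [if_neg (by rw [hcol]; exact Bool.false_ne_true)]
        by_cases hind : (PySem.Str.startswith line "    " || PySem.Str.startswith line "\t") = true
        · have hdec : pvDecisive line = true := by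
            simp only [pvDecisive, hcol, Bool.false_or]; exact hind
          rw [if_pos hind]
          simp only [hdec, List.isEmpty_nil, if_true]
          rw [hcol]
        · have hdec : pvDecisive line = false := by
            simp only [pvDecisive, hcol, Bool.false_or, Bool.not_eq_true] at *
            exact hind
          rw [if_neg hind]
          simp only [hdec]
          exact ih
    · rw [Bool.not_eq_true] at hsig
      have hcond : ((PySem.Str.strip line == "") || PySem.Str.startswith (PySem.Str.strip line) "#") = true := by
        cases hA : (PySem.Str.strip line == "") with
        | true => rw [Bool.true_or]
        | false =>
          cases hB : PySem.Str.startswith (PySem.Str.strip line) "#" with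
          | true => rw [Bool.or_true]
          | false =>
            exfalso
            have : pvSig line = true := by
              simp only [pvSig, hA, hB, Bool.not_false, Bool.and_self]
            rw [hsig] at this; exact Bool.false_ne_true this
      rw [if_pos hcond, if_neg (by rw [hsig]; exact Bool.false_ne_true)]
      exact ih

-- ===== VERDICT (by name: the statement is the Claim_ definition above) =====
theorem fast_syntax_check_py_spec : Claim_equal_fast_syntax_check_py := by
  intro content _
  unfold Spec_fast_syntax_check_py fast_syntax_check_py fast_syntax_check_py_alt
  exact pvGoA_empty_eq _
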